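-- pv_equiv track=rewrite | github.com/cosalamone/prog_labo_I | stark/stark_04.py | generar_codigo_heroe
-- ===== SOURCE A (Python) =====
-- def generar_codigo_heroe(heroe: dict, id: int):
--     '''
-- Brief:
--
-- Parametros:
--     diccionario de un héroe
--     id (int)
-- Retorno:
--
--     '''
--     respuesta = ''
--     cadena_numero = str(id)
--     cantidad_caracteres_id = len(cadena_numero) #10 : 2
--
--
--     if heroe['genero'] == 'F'or heroe['genero'] == 'M'or heroe['genero'] == 'NB':
--         match heroe['genero']:
--             case 'F':
--                 codigo = 'F-2'
--                 cantidad_caracteres_genero = 3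
--                 cantidad_ceros = 10 - cantidad_caracteres_genero - cantidad_caracteres_id
--
--                 lista_ceros = []
--
--                 for i in range(cantidad_ceros):
--                     lista_ceros.append('0')
--
--                 str_ceros = ''.join(map(str, lista_ceros))
--
--                 respuesta = f'{codigo}{str_ceros}{id}'
--
--
--             case 'M':
--                 codigo = 'M-1'
--                 cantidad_caracteres_genero = 3
--                 cantidad_ceros = 10 - cantidad_caracteres_genero - cantidad_caracteres_id
--
--                 lista_ceros = []
--
--                 for i in range(cantidad_ceros):
--                     lista_ceros.append('0')
--
--                 str_ceros = ''.join(map(str, lista_ceros))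
--
--
--
--                 respuesta = f'{codigo}{str_ceros}{id}'
--             case 'NB':
--                 codigo = 'NB-0'
--                 cantidad_caracteres_genero = 4
--                 cantidad_ceros = 10 - cantidad_caracteres_genero - cantidad_caracteres_id
--
--                 lista_ceros = []
--
--                 for i in range(cantidad_ceros):
--                     lista_ceros.append('0')
--
--                 str_ceros = ''.join(map(str, lista_ceros))
--
--
--
--                 respuesta = f'{codigo}{str_ceros}{id}'
--     else:
--         respuesta = 'N/A'
--     return respuesta
-- ===== SOURCE B (Python) =====
-- def generar_codigo_heroe(heroe: dict, id: int):
--     genero = heroe['genero']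
--     ordenes = ('NB', 'M', 'F')
--     if genero not in ordenes:
--         return 'N/A'
--     cuerpo = str(id)
--     while len(genero) + 2 + len(cuerpo) < 10:
--         cuerpo = '0' + cuerpo
--     return genero + '-' + str(ordenes.index(genero)) + cuerpo
-- ===== Notes on version B (the rewrite author's own statement) =====
-- stated objective: alternative
-- what changed: B has no per-gender code table or zero-count arithmetic: it derives the prefix from the gender string itself plus its rank in the tuple ('NB','M','F'), and pads by a while loop that prepends '0' to str(id) until the total length reaches 10; Pre_ only excludes dicts without a 'genero' key, on which both raise KeyError.
import Mathlib
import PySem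

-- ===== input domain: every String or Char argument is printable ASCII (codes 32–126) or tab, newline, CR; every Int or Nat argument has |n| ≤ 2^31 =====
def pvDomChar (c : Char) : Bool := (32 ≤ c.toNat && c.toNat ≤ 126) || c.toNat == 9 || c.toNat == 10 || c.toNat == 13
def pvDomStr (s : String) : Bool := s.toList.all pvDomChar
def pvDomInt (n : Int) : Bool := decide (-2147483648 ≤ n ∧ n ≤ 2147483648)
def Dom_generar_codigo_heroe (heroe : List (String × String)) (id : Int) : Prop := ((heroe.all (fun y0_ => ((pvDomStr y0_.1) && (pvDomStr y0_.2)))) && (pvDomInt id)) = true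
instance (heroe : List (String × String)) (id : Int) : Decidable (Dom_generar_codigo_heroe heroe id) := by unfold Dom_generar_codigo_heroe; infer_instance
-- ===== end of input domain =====

-- B drops A's per-gender code table and zero-count arithmetic: the prefix is derived from the
-- gender string plus its rank in ('NB','M','F'), and zeros are prepended by a while loop driven
-- by the target total length 10; same output, alternative decomposition.

-- ===== PORT A =====
def generar_codigo_heroe (heroe : List (String × String)) (id : Int) : String :=
  let cadena_numero := PySem.Int.toStr id
  let cantidad_caracteres_id := PySem.Str.len cadena_numero
  match (PySem.Dict.mk heroe).get? "genero" with
  | none => ""   -- heroe['genero'] raises KeyError; excluded by Pre_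
  | some g =>
    if g == "F" || g == "M" || g == "NB" then
      -- the match statement, branch by branch
      if g == "F" then
        let cantidad_ceros := 10 - 3 - cantidad_caracteres_id
        let lista_ceros := (PySem.List.pyRange 0 cantidad_ceros 1).foldl (fun acc _ => acc ++ ["0"]) []
        let str_ceros := PySem.Str.join "" lista_ceros
        PySem.Str.join "" ["F-2", str_ceros, cadena_numero]
      else if g == "M" then
        let cantidad_ceros := 10 - 3 - cantidad_caracteres_id
        let lista_ceros := (PySem.List.pyRange 0 cantidad_ceros 1).foldl (fun acc _ => acc ++ ["0"]) []
        let str_ceros := PySem.Str.join "" lista_ceros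
        PySem.Str.join "" ["M-1", str_ceros, cadena_numero]
      else
        let cantidad_ceros := 10 - 4 - cantidad_caracteres_id
        let lista_ceros := (PySem.List.pyRange 0 cantidad_ceros 1).foldl (fun acc _ => acc ++ ["0"]) []
        let str_ceros := PySem.Str.join "" lista_ceros
        PySem.Str.join "" ["NB-0", str_ceros, cadena_numero]
    else
      "N/A"

-- ===== PORT B =====
-- the while loop: prepend '0' to cuerpo while len(genero) + 2 + len(cuerpo) < 10
def pvPad (fijo : Int) (cuerpo : String) : String :=
  if fijo + PySem.Str.len cuerpo < 10 then pvPad fijo ("0" ++ cuerpo) else cuerpo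
termination_by (10 - fijo - PySem.Str.len cuerpo).toNat
decreasing_by
  simp only [PySem.Str.len_eq, String.toList_append, List.length_append,
    show ("0" : String).toList = ['0'] from rfl, List.length_cons, List.length_nil] at *
  omega

def generar_codigo_heroe_alt (heroe : List (String × String)) (id : Int) : String :=
  match (PySem.Dict.mk heroe).get? "genero" with
  | none => ""   -- heroe['genero'] raises KeyError; excluded by Pre_
  | some genero =>
    let ordenes : List String := ["NB", "M", "F"]
    if ¬ (ordenes.contains genero) then "N/A"
    else
      let cuerpo := pvPad (PySem.Str.len genero + 2) (PySem.Int.toStr id)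
      -- ordenes.index(genero): membership was just checked, so index? is some
      genero ++ "-" ++ PySem.Int.toStr (((PySem.List.index? ordenes genero).getD 0 : Nat) : Int) ++ cuerpo

-- ===== PRECONDITION & SPEC =====
-- Pre_ excludes exactly the dicts without a 'genero' key, on which A (and B) raise KeyError.
def Pre_generar_codigo_heroe (heroe : List (String × String)) (id : Int) : Prop :=
  "genero" ∈ heroe.map Prod.fst
instance (heroe : List (String × String)) (id : Int) : Decidable (Pre_generar_codigo_heroe heroe id) := by unfold Pre_generar_codigo_heroe; infer_instance

def pvWitness_generar_codigo_heroe : (List (String × String)) × Int := ([("genero", "F")], 7)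

def Spec_generar_codigo_heroe (heroe : List (String × String)) (id : Int) (out : String) : Prop := out = generar_codigo_heroe_alt heroe id
instance (heroe : List (String × String)) (id : Int) (out : String) : Decidable (Spec_generar_codigo_heroe heroe id out) := by unfold Spec_generar_codigo_heroe; infer_instance

-- ===== CLAIM (what is proved, stated in full; the proofs are below) =====
def Claim_equal_generar_codigo_heroe : Prop := ∀ (heroe : List (String × String)) (id : Int), Dom_generar_codigo_heroe heroe id → Pre_generar_codigo_heroe heroe id → Spec_generar_codigo_heroe heroe id (generar_codigo_heroe heroe id)

-- ===== LEMMAS AND PROOFS =====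

-- A's zero-appending loop builds a replicate
lemma foldl_app_zeros (l : List Int) (init : List String) :
    l.foldl (fun acc _ => acc ++ ["0"]) init = init ++ List.replicate l.length "0" := by
  induction l generalizing init with
  | nil => simp
  | cons x xs ih => simp [ih, List.replicate_succ, List.append_assoc]

-- A's joined zero-list equals a char replicate
lemma join_replicate (k : Nat) :
    PySem.Str.join "" (List.replicate k "0") = String.ofList (List.replicate k '0') := by
  apply String.ext
  have h2 : (List.replicate k "0").map String.toList = (List.replicate k '0').map (fun c => [c]) := by
    simp [List.map_replicate]
  have h3 : ("" : String).toList = ([] : List Char) := rfl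
  simp only [PySem.Str.toList_join, h2, h3, String.toList_ofList]
  exact PySem.Chars.join_nil_singletons _

-- the while loop pads with exactly (10 - fijo - len cuerpo) zeros
lemma pvPad_eq (fijo : Int) (cuerpo : String) :
    pvPad fijo cuerpo = String.ofList (List.replicate (10 - fijo - PySem.Str.len cuerpo).toNat '0') ++ cuerpo := by
  generalize hn : (10 - fijo - PySem.Str.len cuerpo).toNat = n
  induction n generalizing cuerpo with
  | zero =>
    have hge : ¬ (fijo + PySem.Str.len cuerpo < 10) := by
      simp only [PySem.Str.len_eq] at hn ⊢; omega
    rw [pvPad, if_neg hge]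
    apply String.ext
    simp
  | succ n ih =>
    have hlt : fijo + PySem.Str.len cuerpo < 10 := by
      simp only [PySem.Str.len_eq] at hn ⊢; omega
    have hlen : PySem.Str.len ("0" ++ cuerpo) = PySem.Str.len cuerpo + 1 := by
      simp only [PySem.Str.len_eq, String.toList_append, List.length_append,
        show ("0" : String).toList = ['0'] from rfl, List.length_cons, List.length_nil]
      push_cast; ring
    have h2 : (10 - fijo - PySem.Str.len ("0" ++ cuerpo)).toNat = n := by
      rw [hlen]; simp only [PySem.Str.len_eq] at hn ⊢; omega
    rw [pvPad, if_pos hlt, ih ("0" ++ cuerpo) h2]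
    apply String.ext
    simp only [String.toList_append, String.toList_ofList,
      show ("0" : String).toList = ['0'] from rfl]
    rw [← List.append_assoc, ← List.replicate_succ']

-- a key that occurs in the list is found by the dict lookup
lemma get?_mk_ne_none {l : List (String × String)} {k : String}
    (h : k ∈ l.map Prod.fst) : (PySem.Dict.mk l).get? k ≠ none := by
  induction l with
  | nil => simp at h
  | cons p rest ih =>
    obtain ⟨a, b⟩ := p
    rw [PySem.Dict.get?_mk_cons]
    by_cases hk : a = k
    · simp [hk]
    · simp only [List.map_cons, List.mem_cons] at h
      have h' : k ∈ List.map Prod.fst rest := h.resolve_left (by simpa using Ne.symm hk)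
      simpa [hk] using ih h'

theorem generar_codigo_heroe_spec_aux (heroe : List (String × String)) (id : Int)
    (hpre : Pre_generar_codigo_heroe heroe id) :
    generar_codigo_heroe heroe id = generar_codigo_heroe_alt heroe id := by
  unfold generar_codigo_heroe generar_codigo_heroe_alt
  cases hlook : (PySem.Dict.mk heroe).get? "genero" with
  | none => exact absurd hlook (get?_mk_ne_none hpre)
  | some g =>
    simp only []
    by_cases hF : g = "F"
    · subst hF
      simp only [foldl_app_zeros, List.nil_append, PySem.List.length_pyRange_one, join_replicate,
        pvPad_eq]
      apply String.ext
      simp [PySem.Str.len_eq, show ("F":String).toList = ['F'] from rfl, PySem.Str.toList_join,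
        show PySem.Int.toChars (((List.idxOf? "F" ["NB", "M", "F"]).getD 0 : Nat) : Int) = ['2'] from by decide,
        PySem.Chars.join, List.intercalate, List.intersperse]
    · by_cases hM : g = "M"
      · subst hM
        simp only [foldl_app_zeros, List.nil_append, PySem.List.length_pyRange_one, join_replicate,
          pvPad_eq]
        apply String.ext
        simp [PySem.Str.len_eq, show ("M":String).toList = ['M'] from rfl, PySem.Str.toList_join,
          show PySem.Int.toChars (((List.idxOf? "M" ["NB", "M", "F"]).getD 0 : Nat) : Int) = ['1'] from by decide,
          PySem.Chars.join, List.intercalate, List.intersperse]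
      · by_cases hNB : g = "NB"
        · subst hNB
          simp only [foldl_app_zeros, List.nil_append, PySem.List.length_pyRange_one, join_replicate,
            pvPad_eq]
          apply String.ext
          simp [PySem.Str.len_eq, show ("NB":String).toList = ['N','B'] from rfl, PySem.Str.toList_join,
            show PySem.Int.toChars 0 = ['0'] from by decide,
            PySem.Chars.join, List.intercalate, List.intersperse]
        · simp [hF, hM, hNB]

-- ===== VERDICT (by name: the statement is the Claim_ definition above) =====
theorem generar_codigo_heroe_spec : Claim_equal_generar_codigo_heroe := by
  intro heroe id _ hpre
  exact generar_codigo_heroe_spec_aux heroe id hpre
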